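-- pv_equiv track=rewrite | github.com/microsoft/praxxis | src/training/praxxis-training-app/model_utils.py | basic_counter
-- ===== SOURCE A (Python) =====
-- def basic_counter(sequences):
--     """converts sequences of names to numbers"""
--     converter = ["<None>", "<Unknown>"]
--     newSeqs = []
--     for seq in sequences:
--         newSeq = []
--         for filename in seq:
--             if filename not in converter:
--                 converter.append(filename)
--             newSeq.append(converter.index(filename))
--         newSeqs.append(newSeq)
--     return newSeqs, converter
-- ===== SOURCE B (Python) =====
-- def basic_counter(sequences):
--     """converts sequences of names to numbers"""
--     # pass 1: build the vocabulary in first-appearance order (seen set makes membership O(1))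
--     converter = ["<None>", "<Unknown>"]
--     seen = set(converter)
--     for seq in sequences:
--         for filename in seq:
--             if filename not in seen:
--                 seen.add(filename)
--                 converter.append(filename)
--     # one index built once, so the repeated converter.index scans disappear
--     index = {name: i for i, name in enumerate(converter)}
--     # pass 2: encode
--     newSeqs = [[index[filename] for filename in seq] for seq in sequences]
--     return newSeqs, converter
-- ===== Notes on version B (the rewrite author's own statement) =====
-- stated objective: faster
-- what changed: One interleaved loop becomes two passes: build the vocabulary first (a seen set makes the membership test O(1)), then encode every sequence via a name-to-index dict built once, removing the per-element converter.index scan.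
import Mathlib
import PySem

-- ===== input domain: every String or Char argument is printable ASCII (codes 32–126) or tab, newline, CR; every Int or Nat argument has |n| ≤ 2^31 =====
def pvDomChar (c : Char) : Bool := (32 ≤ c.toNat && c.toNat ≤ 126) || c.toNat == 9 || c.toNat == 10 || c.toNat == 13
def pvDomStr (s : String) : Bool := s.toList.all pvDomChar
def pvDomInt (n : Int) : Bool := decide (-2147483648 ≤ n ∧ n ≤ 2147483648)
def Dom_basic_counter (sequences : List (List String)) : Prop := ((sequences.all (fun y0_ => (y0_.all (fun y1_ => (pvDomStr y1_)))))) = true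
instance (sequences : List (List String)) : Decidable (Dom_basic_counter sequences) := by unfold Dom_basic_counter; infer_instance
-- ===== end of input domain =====

-- B changes A's single interleaved loop into two passes (build vocabulary, then encode via a dict built once); objective: faster.

-- ===== PORT A =====
-- inner loop of A: for filename in seq: if not in converter: append; newSeq.append(converter.index(filename))
-- converter.index never raises here (the filename was just ensured present), so .getD 0 is never taken.
def pvAStep (p : List Int × List String) (f : String) : List Int × List String :=
  let c := if f ∈ p.2 then p.2 else p.2 ++ [f]
  (p.1 ++ [(((PySem.List.index? c f).getD 0 : Nat) : Int)], c)

def pvAInner (conv : List String) (seq : List String) : List Int × List String :=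
  seq.foldl pvAStep ([], conv)

def basic_counter (sequences : List (List String)) : List (List Int) × List String :=
  sequences.foldl (fun acc seq =>
    let r := pvAInner acc.2 seq
    (acc.1 ++ [r.1], r.2)) ([], ["<None>", "<Unknown>"])

-- ===== PORT B =====
-- pass 1 of B: the vocabulary in first-appearance order, with a seen set for the membership test
def pvBStep (p : List String × PySem.Set String) (f : String) : List String × PySem.Set String :=
  if f ∈ p.2 then p else (p.1 ++ [f], p.2.add f)

def pvVocabPair (sequences : List (List String)) : List String × PySem.Set String :=
  sequences.foldl (fun st seq => seq.foldl pvBStep st)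
    (["<None>", "<Unknown>"], PySem.Set.ofList ["<None>", "<Unknown>"])

-- {name: i for i, name in enumerate(converter)}
def pvIndexDict (conv : List String) : PySem.Dict String Int :=
  (PySem.List.enumerate conv 0).foldl (fun d p => d.insert p.2 p.1) PySem.Dict.empty

-- index[filename] never raises (every filename was put in the vocabulary in pass 1), so .getD 0 is never taken.
def basic_counter_alt (sequences : List (List String)) : List (List Int) × List String :=
  let conv := (pvVocabPair sequences).1
  let idx := pvIndexDict conv
  (sequences.map (fun seq => seq.map (fun f => (idx.get? f).getD 0)), conv)

-- ===== PRECONDITION & SPEC =====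
def Spec_basic_counter (sequences : List (List String)) (out : List (List Int) × List String) : Prop := out = basic_counter_alt sequences
instance (sequences : List (List String)) (out : List (List Int) × List String) : Decidable (Spec_basic_counter sequences out) := by unfold Spec_basic_counter; infer_instance

-- ===== CLAIM (what is proved, stated in full; the proofs are below) =====
def Claim_equal_basic_counter : Prop := ∀ (sequences : List (List String)), Dom_basic_counter sequences → Spec_basic_counter sequences (basic_counter sequences)

-- ===== LEMMAS AND PROOFS =====

-- one membership-guarded append step, and the vocabulary folds
def pvStep (c : List String) (f : String) : List String := if f ∈ c then c else c ++ [f]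
def pvV1 (conv : List String) (seq : List String) : List String := seq.foldl pvStep conv
def pvV2 (conv : List String) (sequences : List (List String)) : List String :=
  sequences.foldl pvV1 conv

-- encoding against the FULL vocabulary
def pvEnc (full : List String) (f : String) : Int := (((PySem.List.index? full f).getD 0 : Nat) : Int)

lemma pvStep_prefix (c : List String) (f : String) : c <+: pvStep c f := by
  unfold pvStep; split
  · exact List.prefix_rfl
  · exact List.prefix_append _ _

lemma pvV1_prefix (seq : List String) : ∀ conv, conv <+: pvV1 conv seq := by
  induction seq with
  | nil => intro conv; exact List.prefix_rfl
  | cons f t ih =>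
    intro conv
    exact (pvStep_prefix conv f).trans (ih (pvStep conv f))

lemma pvV2_prefix (sequences : List (List String)) : ∀ conv, conv <+: pvV2 conv sequences := by
  induction sequences with
  | nil => intro conv; exact List.prefix_rfl
  | cons s t ih =>
    intro conv
    exact (pvV1_prefix s conv).trans (ih (pvV1 conv s))

lemma pvStep_mem (c : List String) (f : String) : f ∈ pvStep c f := by
  unfold pvStep; split
  · assumption
  · simp

lemma index?_stable (full c : List String) (f : String) (hm : f ∈ c) (hp : c <+: full) :
    PySem.List.index? full f = PySem.List.index? c f := by
  obtain ⟨t, rfl⟩ := hp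
  exact PySem.List.index?_append_of_mem t hm

-- A's inner loop, with the running accumulator made explicit, encodes against any FULL vocabulary
-- that the evolving converter stays a prefix of.
lemma pvAInner_general (full : List String) :
    ∀ (seq : List String) (conv : List String) (acc : List Int),
      pvV1 conv seq <+: full →
      seq.foldl pvAStep (acc, conv)
        = (acc ++ seq.map (pvEnc full), pvV1 conv seq) := by
  intro seq
  induction seq with
  | nil => intro conv acc _; simp [pvV1]
  | cons f t ih =>
    intro conv acc hfull
    have hV1 : pvV1 conv (f :: t) = pvV1 (pvStep conv f) t := by simp [pvV1, pvStep, List.foldl]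
    rw [hV1] at hfull
    have hc : pvStep conv f <+: full := (pvV1_prefix t (pvStep conv f)).trans hfull
    have hix : PySem.List.index? full f = PySem.List.index? (pvStep conv f) f :=
      index?_stable full (pvStep conv f) f (pvStep_mem conv f) hc
    have hstep : pvAStep (acc, conv) f
        = (acc ++ [(((PySem.List.index? (pvStep conv f) f).getD 0 : Nat) : Int)], pvStep conv f) := by
      simp [pvAStep, pvStep]
    rw [List.foldl_cons, hstep,
      ih (pvStep conv f) (acc ++ [(((PySem.List.index? (pvStep conv f) f).getD 0 : Nat) : Int)]) hfull]
    simp only [PySem.List.index?_eq_idxOf?] at hix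
    simp [pvEnc, hix, hV1]

lemma pvAInner_eq (full conv : List String) (seq : List String) (h : pvV1 conv seq <+: full) :
    pvAInner conv seq = (seq.map (pvEnc full), pvV1 conv seq) := by
  have := pvAInner_general full seq conv [] h
  simpa [pvAInner] using this

-- A's outer loop, generalized
lemma pvA_general (full : List String) :
    ∀ (sequences : List (List String)) (conv : List String) (acc : List (List Int)),
      pvV2 conv sequences <+: full →
      sequences.foldl (fun acc seq =>
        let r := pvAInner acc.2 seq
        (acc.1 ++ [r.1], r.2)) (acc, conv)
        = (acc ++ sequences.map (fun seq => seq.map (pvEnc full)), pvV2 conv sequences) := by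
  intro sequences
  induction sequences with
  | nil => intro conv acc _; simp [pvV2]
  | cons s t ih =>
    intro conv acc hfull
    have hV2 : pvV2 conv (s :: t) = pvV2 (pvV1 conv s) t := by simp [pvV2, List.foldl]
    rw [hV2] at hfull
    have hs : pvV1 conv s <+: full := (pvV2_prefix t (pvV1 conv s)).trans hfull
    simp only [List.foldl, List.map]
    rw [pvAInner_eq full conv s hs]
    rw [ih (pvV1 conv s) (acc ++ [s.map (pvEnc full)]) hfull]
    simp [hV2]

-- the vocabulary has no duplicates
lemma pvStep_nodup (c : List String) (f : String) (h : c.Nodup) : (pvStep c f).Nodup := by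
  unfold pvStep; split
  · exact h
  · next hnm =>
      simp only [List.nodup_append]
      refine ⟨h, List.nodup_singleton f, ?_⟩
      intro a ha b hb
      rw [List.mem_singleton] at hb
      subst hb
      exact fun he => hnm (he ▸ ha)

lemma pvV1_nodup (seq : List String) : ∀ conv, conv.Nodup → (pvV1 conv seq).Nodup := by
  induction seq with
  | nil => intro conv h; exact h
  | cons f t ih =>
    intro conv h
    exact ih (pvStep conv f) (pvStep_nodup conv f h)

lemma pvV2_nodup (sequences : List (List String)) :
    ∀ conv, conv.Nodup → (pvV2 conv sequences).Nodup := by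
  induction sequences with
  | nil => intro conv h; exact h
  | cons s t ih =>
    intro conv h
    exact ih (pvV1 conv s) (pvV1_nodup s conv h)

-- the dict comprehension over enumerate looks up exactly list.index
lemma pvDict_get (l : List String) (hnd : l.Nodup) :
    ∀ (s : Int) (d : PySem.Dict String Int) (f : String),
      ((PySem.List.enumerate l s).foldl (fun d p => d.insert p.2 p.1) d).get? f
        = if f ∈ l then (PySem.List.index? l f).map (fun k : Nat => (s + (k : Int))) else d.get? f := by
  induction l with
  | nil => intro s d f; simp [PySem.List.enumerate_nil]
  | cons x t ih =>
    intro s d f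
    have hx : x ∉ t := (List.nodup_cons.mp hnd).1
    have hndt : t.Nodup := (List.nodup_cons.mp hnd).2
    rw [PySem.List.enumerate_cons]
    simp only [List.foldl]
    rw [ih hndt (s + 1) (d.insert x s) f]
    by_cases hfx : f = x
    · subst hfx
      rw [if_neg hx, PySem.Dict.get?_insert_self, if_pos (List.mem_cons_self),
        PySem.List.index?_cons_self]
      simp
    · by_cases hft : f ∈ t
      · rw [if_pos hft, if_pos (List.mem_cons_of_mem x hft),
          PySem.List.index?_cons_of_ne t (Ne.symm hfx)]
        cases h : PySem.List.index? t f with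
        | none => exact absurd hft ((PySem.List.index?_eq_none_iff t f).mp h)
        | some k =>
          simp only [Option.map_some, Option.some.injEq]
          push_cast
          ring
      · rw [if_neg hft, if_neg (by simp [hfx, hft]),
          PySem.Dict.get?_insert_of_ne _ _ hfx]

-- B's lookup (with its never-taken default) equals encoding against the vocabulary
lemma pvLookup_eq_enc (conv : List String) (hnd : conv.Nodup) (f : String) :
    ((pvIndexDict conv).get? f).getD 0 = pvEnc conv f := by
  unfold pvIndexDict pvEnc
  rw [pvDict_get conv hnd 0 PySem.Dict.empty f]
  by_cases h : f ∈ conv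
  · rw [if_pos h]
    cases hix : PySem.List.index? conv f with
    | none => exact absurd h ((PySem.List.index?_eq_none_iff conv f).mp hix)
    | some k => simp
  · rw [if_neg h, (PySem.List.index?_eq_none_iff conv f).mpr h]
    simp

-- the seen set tracks exactly the converter's members, so B's pass 1 builds pvV2
lemma pvBStep_fold_inner (seq : List String) :
    ∀ (st : List String × PySem.Set String), (∀ x, x ∈ st.2 ↔ x ∈ st.1) →
      (seq.foldl pvBStep st).1 = pvV1 st.1 seq ∧
      (∀ x, x ∈ (seq.foldl pvBStep st).2 ↔ x ∈ (seq.foldl pvBStep st).1) := by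
  induction seq with
  | nil => intro st h; exact ⟨by simp [pvV1], h⟩
  | cons f t ih =>
    intro st h
    have hstep : pvBStep st f = (pvStep st.1 f, if f ∈ st.2 then st.2 else st.2.add f) := by
      unfold pvBStep pvStep
      by_cases hf : f ∈ st.2
      · simp [hf, (h f).mp hf]
      · rw [if_neg hf, if_neg hf, if_neg (fun hc => hf ((h f).mpr hc))]
    have hinv : ∀ x, x ∈ (pvBStep st f).2 ↔ x ∈ (pvBStep st f).1 := by
      intro x
      rw [hstep]
      by_cases hf : f ∈ st.2
      · simp only [if_pos hf, pvStep, if_pos ((h f).mp hf)]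
        exact h x
      · simp only [if_neg hf, pvStep, if_neg (fun hc => hf ((h f).mpr hc))]
        rw [PySem.Set.mem_add]
        simp [h x, or_comm]
    have := ih (pvBStep st f) hinv
    refine ⟨?_, this.2⟩
    rw [List.foldl_cons] at *
    rw [this.1, hstep]
    simp [pvV1]

lemma pvVocabPair_eq (sequences : List (List String)) :
    (pvVocabPair sequences).1 = pvV2 ["<None>", "<Unknown>"] sequences := by
  unfold pvVocabPair pvV2
  have : ∀ (st : List String × PySem.Set String), (∀ x, x ∈ st.2 ↔ x ∈ st.1) →
      (sequences.foldl (fun st seq => seq.foldl pvBStep st) st).1 = sequences.foldl pvV1 st.1 ∧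
      (∀ x, x ∈ (sequences.foldl (fun st seq => seq.foldl pvBStep st) st).2 ↔
             x ∈ (sequences.foldl (fun st seq => seq.foldl pvBStep st) st).1) := by
    induction sequences with
    | nil => intro st h; exact ⟨rfl, h⟩
    | cons s t ih =>
      intro st h
      have hs := pvBStep_fold_inner s st h
      have := ih (s.foldl pvBStep st) hs.2
      refine ⟨?_, this.2⟩
      rw [List.foldl_cons, List.foldl_cons, this.1, hs.1]
  exact (this (["<None>", "<Unknown>"], PySem.Set.ofList ["<None>", "<Unknown>"])
    (by intro x; rw [PySem.Set.mem_ofList])).1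

-- ===== VERDICT (by name: the statement is the Claim_ definition above) =====
theorem basic_counter_spec : Claim_equal_basic_counter := by
  intro sequences _
  unfold Spec_basic_counter basic_counter basic_counter_alt
  have hnd : ((pvVocabPair sequences).1).Nodup := by
    rw [pvVocabPair_eq]
    exact pvV2_nodup sequences _ (by decide)
  have hmain := pvA_general ((pvVocabPair sequences).1) sequences ["<None>", "<Unknown>"] []
    (by rw [pvVocabPair_eq])
  rw [hmain]
  simp only [List.nil_append]
  refine Prod.ext ?_ ?_
  · simp only
    refine List.map_congr_left ?_
    intro seq _
    refine List.map_congr_left ?_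
    intro f _
    exact (pvLookup_eq_enc ((pvVocabPair sequences).1) hnd f).symm
  · simpa using (pvVocabPair_eq sequences).symm
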